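-- pv_equiv track=rewrite | github.com/Hojip-Kim/Algorithm | 프로그래머스/2/138476. 귤 고르기/귤 고르기.py | solution
-- ===== SOURCE A (Python) =====
-- def solution(k, tangerine):
--     dict = {}
--     answer = 0
--     for tan in tangerine :
--         if tan in dict :
--             dict[tan] += 1
--         else :
--             dict[tan] = 1
--
--     sortedDict = sorted(dict.items(), key=lambda x: x[1], reverse=True)
--
--     for a,b in sortedDict :
--         k -= b
--         if k > 0 :
--             answer += 1
--             continue
--         else :
--             answer += 1
--             break
--
--     return answer
-- ===== SOURCE B (Python) =====
-- def solution(k, tangerine):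
--     counts = {}
--     for t in tangerine:
--         counts[t] = counts.get(t, 0) + 1
--     n = len(tangerine)
--     hist = [0] * (n + 1)          # hist[f] = how many distinct kinds occur exactly f times
--     for c in counts.values():
--         hist[c] += 1
--     answer = 0
--     rem = k
--     for f in range(n, 0, -1):     # counting sort on frequencies: walk them in descending order
--         m = hist[f]
--         while m > 0:
--             rem -= f
--             answer += 1
--             if rem <= 0:
--                 return answer
--             m -= 1
--     return answer
-- ===== Notes on version B (the rewrite author's own statement) =====
-- stated objective: alternative
-- what changed: replaces sorting the (kind,count) pairs by count with a counting sort: a histogram of frequencies (bounded by len(tangerine)) is built and walked from the highest frequency down with a greedy running sum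
import Mathlib
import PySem

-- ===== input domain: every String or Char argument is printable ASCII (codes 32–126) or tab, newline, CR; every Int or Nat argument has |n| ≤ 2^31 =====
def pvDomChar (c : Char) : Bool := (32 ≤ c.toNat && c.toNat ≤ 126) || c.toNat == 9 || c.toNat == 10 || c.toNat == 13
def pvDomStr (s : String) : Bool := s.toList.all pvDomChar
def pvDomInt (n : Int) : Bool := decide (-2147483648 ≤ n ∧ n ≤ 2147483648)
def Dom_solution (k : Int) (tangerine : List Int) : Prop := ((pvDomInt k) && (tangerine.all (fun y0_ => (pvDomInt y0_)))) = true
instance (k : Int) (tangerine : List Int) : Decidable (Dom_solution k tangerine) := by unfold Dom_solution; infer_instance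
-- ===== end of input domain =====

-- B replaces the comparison sort of (kind,count) pairs by a counting sort on frequencies
-- (histogram indexed by frequency, walked from the highest frequency down); same return value.

-- ===== PORT A =====
-- the 'for a,b in sortedDict' loop with its break
def aLoop : Int → Int → List (Int × Int) → Int
  | _, answer, [] => answer
  | k, answer, (_, b) :: rest =>
      if k - b > 0 then aLoop (k - b) (answer + 1) rest else answer + 1

def solution (k : Int) (tangerine : List Int) : Int :=
  let d := tangerine.foldl
    (fun d tan => if d.contains tan then d.insert tan (d.getD tan 0 + 1) else d.insert tan 1)
    PySem.Dict.empty
  let sortedDict := PySem.List.sorted d.items (fun x => x.2) true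
  aLoop k 0 sortedDict

-- ===== PORT B =====
-- the inner 'while m > 0' loop; Sum.inl = early 'return answer', Sum.inr = fall through
def bInner (f : Int) (m rem ans : Int) : Int ⊕ (Int × Int) :=
  if h : m > 0 then
    let rem' := rem - f
    let ans' := ans + 1
    if rem' ≤ 0 then Sum.inl ans'
    else bInner f (m - 1) rem' ans'
  else Sum.inr (rem, ans)
termination_by m.toNat
decreasing_by omega

-- the 'for f in range(n, 0, -1)' loop
def bOuter (hist : List Int) : List Int → Int → Int → Int
  | [], _, ans => ans
  | f :: rest, rem, ans =>
    match bInner f (PySem.List.pyGetD hist f 0) rem ans with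
    | Sum.inl a => a
    | Sum.inr (rem', ans') => bOuter hist rest rem' ans'

def solution_alt (k : Int) (tangerine : List Int) : Int :=
  let counts := tangerine.foldl (fun d t => d.insert t (d.getD t 0 + 1)) PySem.Dict.empty
  let n : Int := tangerine.length
  let hist := counts.values.foldl
    (fun h c => PySem.List.pySetD h c (PySem.List.pyGetD h c 0 + 1))
    (PySem.List.pyRepeat [(0 : Int)] (n + 1))
  bOuter hist (PySem.List.pyRange n 0 (-1)) k 0

-- ===== PRECONDITION & SPEC =====
def Spec_solution (k : Int) (tangerine : List Int) (out : Int) : Prop := out = solution_alt k tangerine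
instance (k : Int) (tangerine : List Int) (out : Int) : Decidable (Spec_solution k tangerine out) := by unfold Spec_solution; infer_instance

-- ===== CLAIM (what is proved, stated in full; the proofs are below) =====
def Claim_equal_solution : Prop := ∀ (k : Int) (tangerine : List Int), Dom_solution k tangerine → Spec_solution k tangerine (solution k tangerine)

-- ===== LEMMAS AND PROOFS =====

-- common core: the greedy loop over a plain list of counts
def goCore : Int → Int → List Int → Int
  | _, ans, [] => ans
  | k, ans, b :: rest => if k - b > 0 then goCore (k - b) (ans + 1) rest else ans + 1

theorem aLoop_eq_goCore (ps : List (Int × Int)) : ∀ k ans, aLoop k ans ps = goCore k ans (ps.map (·.2)) := by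
  induction ps with
  | nil => intro k ans; rfl
  | cons p rest ih =>
    intro k ans
    obtain ⟨a, b⟩ := p
    simp only [aLoop, goCore, List.map]
    split_ifs <;> simp [ih]

theorem bInner_spec (f : Int) (mn : Nat) : ∀ (rem ans : Int) (L : List Int),
    goCore rem ans (List.replicate mn f ++ L) =
      (match bInner f (mn : Int) rem ans with
       | .inl a => a
       | .inr (r, a) => goCore r a L) := by
  induction mn with
  | zero =>
    intro rem ans L
    rw [bInner]
    simp
  | succ m ih =>
    intro rem ans L
    rw [bInner]
    have h1 : ((m + 1 : Nat) : Int) > 0 := by positivity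
    have h2 : ((m + 1 : Nat) : Int) - 1 = (m : Nat) := by push_cast; ring
    simp only [h1, dif_pos, h2, List.replicate_succ, List.cons_append, goCore]
    by_cases hc : rem - f > 0
    · rw [if_pos hc, if_neg (by omega), ih]
    · rw [if_neg hc, if_pos (by omega)]

theorem bOuter_eq_goCore (hist : List Int) (fs : List Int)
    (h : ∀ f ∈ fs, 0 ≤ PySem.List.pyGetD hist f 0) : ∀ rem ans,
    bOuter hist fs rem ans =
      goCore rem ans (fs.flatMap fun f => List.replicate (PySem.List.pyGetD hist f 0).toNat f) := by
  induction fs with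
  | nil => intro rem ans; rfl
  | cons f rest ih =>
    intro rem ans
    have h0 : 0 ≤ PySem.List.pyGetD hist f 0 := h f (by simp)
    have hcast : (((PySem.List.pyGetD hist f 0).toNat : Nat) : Int) = PySem.List.pyGetD hist f 0 :=
      Int.toNat_of_nonneg h0
    have := bInner_spec f (PySem.List.pyGetD hist f 0).toNat rem ans
      (rest.flatMap fun g => List.replicate (PySem.List.pyGetD hist g 0).toNat g)
    rw [hcast] at this
    simp only [List.flatMap_cons, bOuter]
    rw [this]
    cases hb : bInner f (PySem.List.pyGetD hist f 0) rem ans with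
    | inl a => rfl
    | inr p =>
      obtain ⟨r, a⟩ := p
      exact ih (fun g hg => h g (by simp [hg])) r a

theorem pyGetD_replicate_zero (t : Nat) (j : Int) (hj : 0 ≤ j) :
    PySem.List.pyGetD (List.replicate t (0 : Int)) j 0 = 0 := by
  rw [← Int.toNat_of_nonneg hj, PySem.List.pyGetD_natCast]
  rcases lt_or_ge j.toNat t with h | h
  · simp [List.getD, List.getElem?_replicate, h]
  · simp [List.getD, Nat.not_lt.mpr h]

theorem hist_fold_getD (vals : List Int) : ∀ (h0 : List Int),
    (∀ v ∈ vals, 0 ≤ v ∧ v < (h0.length : Int)) → ∀ j : Int, 0 ≤ j →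
    PySem.List.pyGetD (vals.foldl (fun h c => PySem.List.pySetD h c (PySem.List.pyGetD h c 0 + 1)) h0) j 0
      = PySem.List.pyGetD h0 j 0 + (vals.count j : Int) := by
  induction vals with
  | nil => intro h0 _ j _; simp
  | cons c vs ih =>
    intro h0 hb j hj
    obtain ⟨hc0, hclen⟩ := hb c (by simp)
    have hclt : c.toNat < h0.length := by omega
    have hcint : ((c.toNat : Nat) : Int) = c := Int.toNat_of_nonneg hc0
    have hjint : ((j.toNat : Nat) : Int) = j := Int.toNat_of_nonneg hj
    have hget := PySem.List.pyGetD_pySetD_natCast h0 c.toNat j.toNat (PySem.List.pyGetD h0 c 0 + 1) 0 hclt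
    rw [hcint, hjint] at hget
    simp only [List.foldl_cons]
    rw [ih (PySem.List.pySetD h0 c (PySem.List.pyGetD h0 c 0 + 1))
        (by rw [PySem.List.length_pySetD]; exact fun v hv => hb v (by simp [hv])) j hj]
    rw [hget, List.count_cons]
    by_cases hjc : j = c
    · subst hjc
      rw [if_pos rfl]
      simp
      omega
    · rw [if_neg (by omega)]
      simp [hjc]
      omega

theorem flatMap_congr_mem {α β : Type} (l : List α) (f g : α → List β)
    (h : ∀ x ∈ l, f x = g x) : l.flatMap f = l.flatMap g := by
  induction l with
  | nil => rfl
  | cons x xs ih =>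
    simp only [List.flatMap_cons]
    rw [h x (by simp), ih (fun y hy => h y (by simp [hy]))]

theorem flatMap_replicate_perm (fs : List Int) : ∀ (vals : List Int), fs.Nodup →
    (∀ v ∈ vals, v ∈ fs) →
    (fs.flatMap fun f => List.replicate (vals.count f) f).Perm vals := by
  induction fs with
  | nil =>
    intro vals _ hsub
    cases vals with
    | nil => simp
    | cons v vs => exact absurd (hsub v (by simp)) (by simp)
  | cons f rest ih =>
    intro vals hnd hsub
    have hfnotin : f ∉ rest := (List.nodup_cons.mp hnd).1
    set vals' := vals.filter (fun v => !(v == f)) with hvals'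
    have hcnt : ∀ g ∈ rest, vals.count g = vals'.count g := by
      intro g hg
      have hgf : g ≠ f := fun h => hfnotin (h ▸ hg)
      rw [hvals', List.count_filter (by simp [hgf])]
    have hrw : (rest.flatMap fun g => List.replicate (vals.count g) g)
        = rest.flatMap fun g => List.replicate (vals'.count g) g :=
      flatMap_congr_mem rest _ _ (fun g hg => by rw [hcnt g hg])
    have hperm' : (rest.flatMap fun g => List.replicate (vals'.count g) g).Perm vals' := by
      apply ih vals' (List.nodup_cons.mp hnd).2
      intro v hv
      have hvmem : v ∈ vals := List.mem_of_mem_filter hv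
      have hvf : ¬ (v == f) = true := by
        have := List.of_mem_filter hv; simpa using this
      have := hsub v hvmem
      simp only [List.mem_cons] at this
      rcases this with h | h
      · exact absurd (by simp [h]) hvf
      · exact h
    simp only [List.flatMap_cons]
    rw [hrw]
    refine (hperm'.append_left _).trans ?_
    rw [show List.replicate (vals.count f) f = vals.filter (· == f) from (List.filter_beq f).symm]
    exact List.filter_append_perm _ vals

theorem flatMap_replicate_sorted (fs : List Int) (c : Int → Nat) (h : fs.Pairwise (· > ·)) :
    (fs.flatMap fun f => List.replicate (c f) f).Pairwise (fun a b => b ≤ a) := by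
  rw [List.pairwise_flatMap]
  constructor
  · intro a _
    exact List.pairwise_replicate.mpr (by simp)
  · refine h.imp_of_mem ?_
    intro a b _ _ hab x hx y hy
    rw [List.eq_of_mem_replicate hx, List.eq_of_mem_replicate hy]
    exact le_of_lt hab

theorem dict_fold_eq_counter (t : List Int) :
    t.foldl (fun d tan => if d.contains tan then d.insert tan (d.getD tan 0 + 1) else d.insert tan 1)
      PySem.Dict.empty = PySem.Dict.counter t := by
  have hf : (fun (d : PySem.Dict Int Int) tan =>
      if d.contains tan then d.insert tan (d.getD tan 0 + 1) else d.insert tan 1)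
      = fun d tan => d.insert tan (d.getD tan 0 + 1) := by
    funext d x
    by_cases h : d.contains x
    · simp [h]
    · have h0 : d.getD x 0 = (0 : Int) := PySem.Dict.getD_of_not_contains d 0 (by simpa using h)
      rw [if_neg h, h0]
      norm_num
  rw [hf, PySem.Dict.foldl_insert_getD_add_one_eq_counter]

theorem counter_values_eq (t : List Int) :
    (PySem.Dict.counter t).values = (PySem.Set.ofList t : List Int).map (fun key => (t.count key : Int)) := by
  show ((PySem.Dict.counter t).items).map (·.2) = _
  rw [PySem.Dict.items_counter, List.map_map]
  rfl

theorem counter_values_bounds (t : List Int) :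
    ∀ v ∈ (PySem.Dict.counter t).values, 1 ≤ v ∧ v ≤ (t.length : Int) := by
  intro v hv
  rw [counter_values_eq] at hv
  obtain ⟨key, hkey, rfl⟩ := List.mem_map.mp hv
  have hmem : key ∈ t := (PySem.Set.mem_ofList t key).mp hkey
  constructor
  · exact_mod_cast List.count_pos_iff.mpr hmem
  · exact_mod_cast List.count_le_length

theorem solution_spec : Claim_equal_solution := by
  intro k t _
  unfold Spec_solution solution solution_alt
  simp only [dict_fold_eq_counter, PySem.Dict.foldl_insert_getD_add_one_eq_counter]
  set vals := (PySem.Dict.counter t).values with hvals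
  set n : Int := (t.length : Int) with hn
  have hn0 : 0 ≤ n := by simp [hn]
  -- the histogram
  set hist0 := PySem.List.pyRepeat [(0 : Int)] (n + 1) with hhist0
  have hhist0' : hist0 = List.replicate (n + 1).toNat 0 := PySem.List.pyRepeat_singleton _ _
  have hlen0 : (hist0.length : Int) = n + 1 := by
    rw [hhist0', List.length_replicate]; omega
  set hist := vals.foldl (fun h c => PySem.List.pySetD h c (PySem.List.pyGetD h c 0 + 1)) hist0 with hhist
  have hbounds : ∀ v ∈ vals, 0 ≤ v ∧ v < (hist0.length : Int) := by
    intro v hv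
    have := counter_values_bounds t v hv
    rw [hlen0]; omega
  have hist_getD : ∀ j : Int, 0 ≤ j → PySem.List.pyGetD hist j 0 = (vals.count j : Int) := by
    intro j hj
    rw [hhist, hist_fold_getD vals hist0 hbounds j hj, hhist0', pyGetD_replicate_zero _ _ hj, zero_add]
  -- the descending frequency range
  set fs := PySem.List.pyRange n 0 (-1) with hfs
  have hfs_mem : ∀ f ∈ fs, 0 < f ∧ f ≤ n := by
    intro f hf; exact PySem.List.mem_pyRange_neg_one.mp (hfs ▸ hf)
  have hfs_nonneg : ∀ f ∈ fs, 0 ≤ PySem.List.pyGetD hist f 0 := by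
    intro f hf
    rw [hist_getD f (le_of_lt (hfs_mem f hf).1)]
    positivity
  rw [bOuter_eq_goCore hist fs hfs_nonneg k 0]
  have hcongr : (fs.flatMap fun f => List.replicate (PySem.List.pyGetD hist f 0).toNat f)
      = fs.flatMap fun f => List.replicate (vals.count f) f :=
    flatMap_congr_mem fs _ _ (fun f hf => by
      rw [hist_getD f (le_of_lt (hfs_mem f hf).1), Int.toNat_natCast])
  rw [hcongr]
  set E := fs.flatMap fun f => List.replicate (vals.count f) f with hE
  -- E is the descending multiset of counts
  have hfs_nodup : fs.Nodup := by
    rw [hfs, PySem.List.pyRange_neg_one_eq_reverse]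
    simp [PySem.List.nodup_pyRange_one]
  have hfs_gt : fs.Pairwise (· > ·) := by
    rw [hfs, PySem.List.pyRange_neg_one_eq_reverse]
    exact (List.pairwise_reverse).mpr (by simpa using PySem.List.pairwise_lt_pyRange_one 1 (n + 1))
  have hEperm : E.Perm vals := by
    apply flatMap_replicate_perm fs vals hfs_nodup
    intro v hv
    have := counter_values_bounds t v hv
    rw [hfs]
    exact PySem.List.mem_pyRange_neg_one.mpr ⟨by omega, by omega⟩
  have hEsorted : E.Pairwise (fun a b => b ≤ a) := flatMap_replicate_sorted fs _ hfs_gt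
  -- A's sorted count list
  set sortedVals := (PySem.List.sorted (PySem.Dict.counter t).items (fun x => x.2) true).map (·.2)
    with hSV
  have hSperm : sortedVals.Perm vals :=
    (PySem.List.sorted_perm (PySem.Dict.counter t).items (fun x => x.2) true).map (·.2)
  have hSsorted : sortedVals.Pairwise (fun a b => b ≤ a) := by
    rw [hSV, List.pairwise_map]
    exact PySem.List.sorted_pairwise_rev (PySem.Dict.counter t).items (fun x => x.2)
  have hEq : sortedVals = E :=
    (hSperm.trans hEperm.symm).eq_of_pairwise
      (fun a b _ _ h1 h2 => le_antisymm h2 h1) hSsorted hEsorted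
  rw [aLoop_eq_goCore, ← hSV, hEq]
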